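-- pv_equiv track=rewrite | github.com/martinrf79/mvn1-analytics | core/pre_parser.py | _detect_separator
-- ===== SOURCE A (Python) =====
-- def _detect_separator(line):
--     """Detecta el separador mas probable en una linea."""
--     candidates = [
--         (",", line.count(",")),
--         (";", line.count(";")),
--         ("\t", line.count("\t")),
--         ("|", line.count("|")),
--     ]
--     candidates = [(sep, cnt) for sep, cnt in candidates if cnt > 0]
--     if candidates:
--         return max(candidates, key=lambda x: x[1])[0]
--     return ","
-- ===== SOURCE B (Python) =====
-- def _detect_separator(line):
--     """Detecta el separador mas probable en una linea.
--
--     Streaming: mantiene el lider (separador, cuenta, rango) en linea, en un solo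
--     paso; no hay fase de seleccion posterior."""
--     best = None
--     best_cnt = 0
--     best_rank = 4
--     nc = ns = nt = npipe = 0
--     for ch in line:
--         if ch == ",":
--             nc += 1
--             n, r = nc, 0
--         elif ch == ";":
--             ns += 1
--             n, r = ns, 1
--         elif ch == "\t":
--             nt += 1
--             n, r = nt, 2
--         elif ch == "|":
--             npipe += 1
--             n, r = npipe, 3
--         else:
--             continue
--         if n > best_cnt or (n == best_cnt and r < best_rank):
--             best, best_cnt, best_rank = ch, n, r
--     return best if best is not None else ","
-- ===== Notes on version B (the rewrite author's own statement) =====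
-- stated objective: alternative
-- what changed: A makes four full str.count scans, builds a candidate list, filters it and calls max with a key; B is a streaming algorithm: one pass over the line maintaining the current leader (separator, count, rank) online, promoting a separator the moment its running count overtakes (or ties at lower rank) the leader, so there is no selection phase at all.
import Mathlib
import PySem

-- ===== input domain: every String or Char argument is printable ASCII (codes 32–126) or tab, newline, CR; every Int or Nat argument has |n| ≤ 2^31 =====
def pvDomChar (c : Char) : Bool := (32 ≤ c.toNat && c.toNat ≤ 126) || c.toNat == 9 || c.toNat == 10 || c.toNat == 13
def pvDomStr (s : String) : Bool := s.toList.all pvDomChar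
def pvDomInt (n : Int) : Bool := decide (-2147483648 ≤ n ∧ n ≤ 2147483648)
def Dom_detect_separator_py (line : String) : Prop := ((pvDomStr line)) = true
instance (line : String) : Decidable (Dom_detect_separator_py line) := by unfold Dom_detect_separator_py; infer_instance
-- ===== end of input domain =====

-- B replaces A's four str.count scans + filter + max(key) by one streaming pass that
-- maintains the current leader (separator, count, rank) online; same result, no speed claimed.

-- ===== PORT A =====
def detect_separator_py (line : String) : String :=
  let candidates : List (String × Int) :=
    [(",", (PySem.Str.count line "," : Int)), (";", (PySem.Str.count line ";" : Int)),
     ("\t", (PySem.Str.count line "\t" : Int)), ("|", (PySem.Str.count line "|" : Int))]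
  let candidates := candidates.filter (fun p => 0 < p.2)
  -- 'if candidates: return max(candidates, key=...)[0]; return ","' : max? [] = none is the empty case
  match PySem.List.max? candidates (fun x => x.2) with
  | some m => m.1
  | none => ","

-- ===== PORT B =====
-- 'if n > best_cnt or (n == best_cnt and r < best_rank): best, best_cnt, best_rank = ch, n, r'
def updB (cnts : Int × Int × Int × Int) (sel : Option String × Int × Int)
    (s : String) (n r : Int) : (Int × Int × Int × Int) × Option String × Int × Int :=
  if sel.2.1 < n ∨ (n = sel.2.1 ∧ r < sel.2.2) then (cnts, some s, n, r) else (cnts, sel)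

-- the if/elif chain of Source B's loop body (state = four running counts + current leader)
def stepB (st : (Int × Int × Int × Int) × Option String × Int × Int) (ch : Char) :
    (Int × Int × Int × Int) × Option String × Int × Int :=
  if ch = ',' then updB (st.1.1 + 1, st.1.2.1, st.1.2.2.1, st.1.2.2.2) st.2 "," (st.1.1 + 1) 0
  else if ch = ';' then updB (st.1.1, st.1.2.1 + 1, st.1.2.2.1, st.1.2.2.2) st.2 ";" (st.1.2.1 + 1) 1
  else if ch = '\t' then updB (st.1.1, st.1.2.1, st.1.2.2.1 + 1, st.1.2.2.2) st.2 "\t" (st.1.2.2.1 + 1) 2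
  else if ch = '|' then updB (st.1.1, st.1.2.1, st.1.2.2.1, st.1.2.2.2 + 1) st.2 "|" (st.1.2.2.2 + 1) 3
  else st

def detect_separator_py_alt (line : String) : String :=
  let st := line.toList.foldl stepB ((0, 0, 0, 0), none, 0, 4)
  match st.2.1 with
  | some s => s
  | none => ","

-- ===== PRECONDITION & SPEC =====
def Spec_detect_separator_py (line : String) (out : String) : Prop := out = detect_separator_py_alt line
instance (line : String) (out : String) : Decidable (Spec_detect_separator_py line out) := by unfold Spec_detect_separator_py; infer_instance

-- ===== CLAIM (what is proved, stated in full; the proofs are below) =====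
def Claim_equal_detect_separator_py : Prop := ∀ (line : String), Dom_detect_separator_py line → Spec_detect_separator_py line (detect_separator_py line)

-- ===== LEMMAS AND PROOFS =====

-- the leader B maintains, as a function of the four counts: first maximal positive in fixed order
def Gsel (a b c d : Nat) : Option String × Int × Int :=
  if b ≤ a ∧ c ≤ a ∧ d ≤ a ∧ 0 < a then (some ",", (a : Int), 0)
  else if c ≤ b ∧ d ≤ b ∧ 0 < b then (some ";", (b : Int), 1)
  else if d ≤ c ∧ 0 < c then (some "\t", (c : Int), 2)
  else if 0 < d then (some "|", (d : Int), 3)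
  else (none, 0, 4)

-- one update step merges a separator occurrence into the leader (one lemma per separator)
set_option maxHeartbeats 1000000 in
theorem selC (a b c d : Nat) (P : Int × Int × Int × Int) :
    updB P (Gsel a b c d) "," ((a : Int) + 1) 0 = (P, Gsel (a + 1) b c d) := by
  unfold updB Gsel
  split_ifs <;> simp_all <;> omega

set_option maxHeartbeats 1000000 in
theorem selS (a b c d : Nat) (P : Int × Int × Int × Int) :
    updB P (Gsel a b c d) ";" ((b : Int) + 1) 1 = (P, Gsel a (b + 1) c d) := by
  unfold updB Gsel
  split_ifs <;> simp_all <;> omega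

set_option maxHeartbeats 1000000 in
theorem selT (a b c d : Nat) (P : Int × Int × Int × Int) :
    updB P (Gsel a b c d) "\t" ((c : Int) + 1) 2 = (P, Gsel a b (c + 1) d) := by
  unfold updB Gsel
  split_ifs <;> simp_all <;> omega

set_option maxHeartbeats 1000000 in
theorem selP (a b c d : Nat) (P : Int × Int × Int × Int) :
    updB P (Gsel a b c d) "|" ((d : Int) + 1) 3 = (P, Gsel a b c (d + 1)) := by
  unfold updB Gsel
  split_ifs <;> simp_all <;> omega

-- one loop step preserves the invariant
theorem stepB_G (a b c d : Nat) (x : Char) :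
    stepB (((a : Int), (b : Int), (c : Int), (d : Int)), Gsel a b c d) x =
      (((((a + if x = ',' then 1 else 0 : Nat)) : Int), (((b + if x = ';' then 1 else 0 : Nat)) : Int),
        (((c + if x = '\t' then 1 else 0 : Nat)) : Int), (((d + if x = '|' then 1 else 0 : Nat)) : Int)),
       Gsel (a + if x = ',' then 1 else 0) (b + if x = ';' then 1 else 0)
            (c + if x = '\t' then 1 else 0) (d + if x = '|' then 1 else 0)) := by
  by_cases h1 : x = ','
  · subst h1; simp [stepB, selC]
  by_cases h2 : x = ';'
  · subst h2; simp [stepB, h1, selS]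
  by_cases h3 : x = '\t'
  · subst h3; simp [stepB, h1, h2, selT]
  by_cases h4 : x = '|'
  · subst h4; simp [stepB, h1, h2, h3, selP]
  · simp [stepB, h1, h2, h3, h4]

-- the fold computes the counts and their leader
theorem foldB (l : List Char) :
    l.foldl stepB ((0, 0, 0, 0), none, 0, 4) =
      ((((l.count ',' : Nat) : Int), ((l.count ';' : Nat) : Int), ((l.count '\t' : Nat) : Int), ((l.count '|' : Nat) : Int)),
        Gsel (l.count ',') (l.count ';') (l.count '\t') (l.count '|')) := by
  induction l using List.reverseRecOn with
  | nil => simp [Gsel]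
  | append_singleton l x ih =>
      rw [List.foldl_append, ih]
      simp only [List.foldl]
      rw [stepB_G]
      simp [List.count_append, List.count_singleton]

-- A's filter + first-maximum over the four counts equals the leader Gsel
set_option maxHeartbeats 1000000 in
theorem A_eq_G (a b c d : Nat) :
    (match PySem.List.max? (([(",", (a : Int)), (";", (b : Int)), ("\t", (c : Int)),
        ("|", (d : Int))]).filter (fun p => 0 < p.2)) (fun x => x.2) with
     | some m => m.1
     | none => ",") =
    (match (Gsel a b c d).1 with
     | some s => s
     | none => ",") := by
  by_cases ha : a = 0 <;> by_cases hb : b = 0 <;> by_cases hc : c = 0 <;> by_cases hd : d = 0 <;>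
    simp_all [List.filter, PySem.List.max?, Gsel, Nat.pos_of_ne_zero] <;>
    (repeat' (first | omega | (split_ifs <;> simp_all <;> try omega)))

-- PySem.Chars.count for a single-character pattern is List.count (fuel-indexed helper first)
theorem go_single (c : Char) : ∀ (fuel : Nat) (l : List Char) (acc : Nat), l.length ≤ fuel →
    PySem.Chars.count.go [c] fuel l acc = acc + l.count c := by
  intro fuel
  induction fuel with
  | zero =>
    intro l acc h
    cases l with
    | nil => simp [PySem.Chars.count.go]
    | cons a t => simp at h
  | succ n ih =>
    intro l acc h
    cases l with
    | nil => simp [PySem.Chars.count.go]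
    | cons a t =>
      simp only [PySem.Chars.count.go, List.isPrefixOf, List.count_cons]
      by_cases hc : a = c
      · simp [hc, ih t (acc + 1) (by simpa using h)]; omega
      · simp [hc, Ne.symm hc, ih t acc (by simpa using h)]

theorem count_single (s : String) (c : Char) : PySem.Chars.count s.toList [c] = s.toList.count c := by
  rw [show PySem.Chars.count s.toList [c] = PySem.Chars.count.go [c] s.toList.length s.toList 0 from by
        simp [PySem.Chars.count]]
  simpa using go_single c s.toList.length s.toList 0 le_rfl

-- ===== VERDICT (by name: the statement is the Claim_ definition above) =====
theorem detect_separator_py_spec : Claim_equal_detect_separator_py := by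
  intro line _
  unfold Spec_detect_separator_py detect_separator_py detect_separator_py_alt
  have hcnt : ∀ (c : Char), PySem.Str.count line (String.ofList [c]) = line.toList.count c := by
    intro c
    rw [show PySem.Str.count line (String.ofList [c]) = PySem.Chars.count line.toList [c] from by
          simp [PySem.Str.count, String.toList_ofList]]
    exact count_single line c
  rw [foldB]
  simp only []
  rw [show ("," : String) = String.ofList [','] from rfl, show (";" : String) = String.ofList [';'] from rfl,
      show ("\t" : String) = String.ofList ['\t'] from rfl, show ("|" : String) = String.ofList ['|'] from rfl]
  rw [hcnt ',', hcnt ';', hcnt '\t', hcnt '|']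
  exact A_eq_G _ _ _ _
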